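-- pv_equiv track=rewrite | github.com/bellmatt/adventofcode | src/day13.py | plot_map
-- ===== SOURCE A (Python) =====
-- from typing import List, Tuple
--
-- def plot_map(
--     input: List[Tuple[int, int]], dimensions: Tuple[int, int]
-- ) -> List[List[int]]:
--     transparent_paper_map = []
--     for y in range(dimensions[1]):
--         transparent_paper_map.append([""] * dimensions[0])
--     for y in range(len(transparent_paper_map)):
--         for x in range(len(transparent_paper_map[y])):
--             if (x, y) in input:
--                 transparent_paper_map[y][x] = "#"
--             else:
--                 transparent_paper_map[y][x] = "."
--     return transparent_paper_map
-- ===== SOURCE B (Python) =====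
-- from typing import List, Tuple
--
-- def plot_map(
--     input: List[Tuple[int, int]], dimensions: Tuple[int, int]
-- ) -> List[List[int]]:
--     w, h = dimensions
--     grid = [["."] * w for _ in range(h)]
--     for (x, y) in input:
--         if 0 <= x < w and 0 <= y < h:
--             grid[y][x] = "#"
--     return grid
-- ===== Notes on version B (the rewrite author's own statement) =====
-- stated objective: alternative
-- what changed: Replaces A's gather pass (scan every grid cell and test tuple-membership in the point list) with a fill-then-scatter pass: build an all-'.' grid once and write '#' only at each in-bounds input point; per-cell work drops from O(n) to O(1), though grid construction itself still costs O(W*H) in both.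
import Mathlib
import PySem

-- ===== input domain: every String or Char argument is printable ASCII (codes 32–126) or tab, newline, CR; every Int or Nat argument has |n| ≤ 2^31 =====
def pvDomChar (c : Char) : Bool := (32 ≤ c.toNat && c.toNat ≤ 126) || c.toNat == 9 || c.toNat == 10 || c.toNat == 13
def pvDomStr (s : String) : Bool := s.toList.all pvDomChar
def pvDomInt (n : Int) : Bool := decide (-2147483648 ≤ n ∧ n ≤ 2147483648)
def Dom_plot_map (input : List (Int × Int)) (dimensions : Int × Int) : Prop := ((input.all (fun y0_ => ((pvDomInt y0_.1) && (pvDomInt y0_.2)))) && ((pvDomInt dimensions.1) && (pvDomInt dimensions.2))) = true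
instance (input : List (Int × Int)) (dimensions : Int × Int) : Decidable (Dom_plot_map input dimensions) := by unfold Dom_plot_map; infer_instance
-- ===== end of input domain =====

-- B builds the all-'.' grid once and writes '#' only at each in-bounds input point
-- (fill-then-scatter), instead of A's scan of every cell with a membership test.

-- ===== PORT A =====
-- first loop: transparent_paper_map = H rows of [""] * dimensions[0];
-- second loop: overwrite every cell by the membership test — ported as mapIdx over
-- the same rows (the loop writes each index exactly once, in order).
def plot_map (input : List (Int × Int)) (dimensions : Int × Int) : List (List String) :=
  let m : List (List String) :=
    (PySem.List.pyRange 0 dimensions.2 1).map (fun _ => List.replicate dimensions.1.toNat "")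
  m.mapIdx (fun y row =>
    row.mapIdx (fun x _ => if ((x : Int), (y : Int)) ∈ input then "#" else "."))

-- ===== PORT B =====
-- loop body of Source B: if the point is in bounds, set grid[y][x] = "#"
def pvScatterStep (w h : Int) (g : List (List String)) (p : Int × Int) : List (List String) :=
  if 0 ≤ p.1 ∧ p.1 < w ∧ 0 ≤ p.2 ∧ p.2 < h then
    g.modify p.2.toNat (fun row => row.set p.1.toNat "#")
  else g

def plot_map_alt (input : List (Int × Int)) (dimensions : Int × Int) : List (List String) :=
  input.foldl (pvScatterStep dimensions.1 dimensions.2)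
    ((List.range dimensions.2.toNat).map (fun _ => List.replicate dimensions.1.toNat "."))

-- ===== PRECONDITION & SPEC =====
def Spec_plot_map (input : List (Int × Int)) (dimensions : Int × Int) (out : List (List String)) : Prop := out = plot_map_alt input dimensions
instance (input : List (Int × Int)) (dimensions : Int × Int) (out : List (List String)) : Decidable (Spec_plot_map input dimensions out) := by unfold Spec_plot_map; infer_instance

-- ===== CLAIM (what is proved, stated in full; the proofs are below) =====
def Claim_equal_plot_map : Prop := ∀ (input : List (Int × Int)) (dimensions : Int × Int), Dom_plot_map input dimensions → Spec_plot_map input dimensions (plot_map input dimensions)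

-- ===== LEMMAS AND PROOFS =====

lemma pvStep_length (w h : Int) (g : List (List String)) (p : Int × Int) :
    (pvScatterStep w h g p).length = g.length := by
  unfold pvScatterStep; split <;> simp

lemma pvStep_rows (w h : Int) (g : List (List String)) (p : Int × Int) (n : Nat)
    (hrow : ∀ row ∈ g, row.length = n) :
    ∀ row ∈ pvScatterStep w h g p, row.length = n := by
  unfold pvScatterStep
  split
  · intro row hr
    rw [List.mem_iff_getElem] at hr
    obtain ⟨j, hj, rfl⟩ := hr
    rw [List.getElem_modify]
    split
    · simp [hrow _ (List.getElem_mem _)]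
    · exact hrow _ (List.getElem_mem _)
  · exact hrow

lemma pvFold_length (w h : Int) (l : List (Int × Int)) (g : List (List String)) :
    (l.foldl (pvScatterStep w h) g).length = g.length := by
  induction l generalizing g with
  | nil => rfl
  | cons p l ih => simp [List.foldl_cons, ih, pvStep_length]

lemma pvFold_rows (w h : Int) (l : List (Int × Int)) (g : List (List String)) (n : Nat)
    (hrow : ∀ row ∈ g, row.length = n) :
    ∀ row ∈ l.foldl (pvScatterStep w h) g, row.length = n := by
  induction l generalizing g with
  | nil => exact hrow
  | cons p l ih => exact ih _ (pvStep_rows w h g p n hrow)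

lemma pvStep_cell (w h : Int) (g : List (List String)) (p : Int × Int) (x y : Nat)
    (hg : g.length = h.toNat) (hrow : ∀ row ∈ g, row.length = w.toNat)
    (hx : x < w.toNat) (hy : y < h.toNat) :
    ((pvScatterStep w h g p).getD y []).getD x "" =
      if p = ((x : Int), (y : Int)) then "#" else (g.getD y []).getD x "" := by
  have hyg : y < g.length := by omega
  have hrl : g[y].length = w.toNat := hrow _ (List.getElem_mem _)
  unfold pvScatterStep
  by_cases hb : 0 ≤ p.1 ∧ p.1 < w ∧ 0 ≤ p.2 ∧ p.2 < h
  · rw [if_pos hb]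
    have hylt : y < (g.modify p.2.toNat (fun row => row.set p.1.toNat "#")).length := by
      simpa using hyg
    rw [List.getD_eq_getElem _ _ hylt, List.getElem_modify, List.getD_eq_getElem _ _ hyg]
    by_cases hp : p = ((x : Int), (y : Int))
    · subst hp
      have h1 : (x : Int).toNat = x := by omega
      have h2 : (y : Int).toNat = y := by omega
      rw [if_pos h2, if_pos rfl]
      rw [List.getD_eq_getElem _ _ (by simp [hrl]; omega)]
      simp [h1]
    · rw [if_neg hp]
      by_cases hyy : p.2.toNat = y
      · rw [if_pos hyy]
        have hp2 : p.2 = (y : Int) := by omega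
        have hp1 : p.1 ≠ (x : Int) := by
          intro hc; exact hp (by rw [← hc, ← hp2])
        have hxn : p.1.toNat ≠ x := by omega
        rw [List.getD_eq_getElem _ _ (by simp [hrl]; omega),
            List.getD_eq_getElem _ _ (by omega)]
        simp [hxn]
      · rw [if_neg hyy]
  · rw [if_neg hb]
    have hp : p ≠ ((x : Int), (y : Int)) := by
      intro hc; subst hc; simp at hb; omega
    rw [if_neg hp]

lemma pvFold_cell (w h : Int) (l : List (Int × Int)) (g : List (List String)) (x y : Nat)
    (hg : g.length = h.toNat) (hrow : ∀ row ∈ g, row.length = w.toNat)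
    (hx : x < w.toNat) (hy : y < h.toNat) :
    ((l.foldl (pvScatterStep w h) g).getD y []).getD x "" =
      if ((x : Int), (y : Int)) ∈ l then "#" else (g.getD y []).getD x "" := by
  induction l generalizing g with
  | nil => simp
  | cons p l ih =>
    rw [List.foldl_cons]
    rw [ih _ (by rw [pvStep_length]; exact hg) (pvStep_rows w h g p _ hrow)]
    rw [pvStep_cell w h g p x y hg hrow hx hy]
    by_cases hm : ((x : Int), (y : Int)) ∈ l
    · simp [hm]
    · by_cases hp : p = ((x : Int), (y : Int)) <;>
        simp [hm, hp, List.mem_cons, eq_comm]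

lemma pvA_row (input : List (Int × Int)) (dimensions : Int × Int) (y : Nat)
    (hy : y < dimensions.2.toNat) :
    (plot_map input dimensions).getD y [] =
      (List.replicate dimensions.1.toNat ("" : String)).mapIdx
        (fun x _ => if ((x : Int), (y : Int)) ∈ input then "#" else ".") := by
  have hlen : (plot_map input dimensions).length = dimensions.2.toNat := by
    unfold plot_map
    simp [PySem.List.length_pyRange_one]
  have h1 : y < (plot_map input dimensions).length := by rw [hlen]; exact hy
  rw [List.getD_eq_getElem _ _ h1]
  unfold plot_map
  rw [List.getElem_mapIdx, List.getElem_map]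

lemma pvA_cell (input : List (Int × Int)) (dimensions : Int × Int) (x y : Nat)
    (hx : x < dimensions.1.toNat) (hy : y < dimensions.2.toNat) :
    ((plot_map input dimensions).getD y []).getD x "" =
      if ((x : Int), (y : Int)) ∈ input then "#" else "." := by
  rw [pvA_row input dimensions y hy]
  have h2 : x < ((List.replicate dimensions.1.toNat ("" : String)).mapIdx
      (fun x _ => if ((x : Int), (y : Int)) ∈ input then "#" else ".")).length := by
    simp only [List.length_mapIdx, List.length_replicate]; omega
  rw [List.getD_eq_getElem _ _ h2, List.getElem_mapIdx]

lemma pvB_base_cell (w h : Int) (x y : Nat) (hx : x < w.toNat) (hy : y < h.toNat) :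
    ((((List.range h.toNat).map (fun _ => List.replicate w.toNat ("." : String)))).getD y []).getD x ""
      = "." := by
  have h1 : ((List.range h.toNat).map
      (fun _ => List.replicate w.toNat ("." : String))).getD y [] =
      List.replicate w.toNat ("." : String) := by
    have hy' : y < ((List.range h.toNat).map
        (fun _ => List.replicate w.toNat ("." : String))).length := by simpa using hy
    rw [List.getD_eq_getElem _ _ hy', List.getElem_map]
  rw [h1]
  have hx' : x < (List.replicate w.toNat ("." : String)).length := by simpa using hx
  rw [List.getD_eq_getElem _ _ hx']
  simp

-- ===== VERDICT (by name: the statement is the Claim_ definition above) =====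
theorem plot_map_spec : Claim_equal_plot_map := by
  unfold Claim_equal_plot_map
  intro input dims _
  unfold Spec_plot_map
  have hbaselen : (((List.range dims.2.toNat).map
      (fun _ => List.replicate dims.1.toNat ("." : String)))).length = dims.2.toNat := by simp
  have hbaserows : ∀ row ∈ ((List.range dims.2.toNat).map
      (fun _ => List.replicate dims.1.toNat ("." : String))), row.length = dims.1.toNat := by
    intro row hr; rcases List.mem_map.mp hr with ⟨_, _, rfl⟩; simp
  have hAlen : (plot_map input dims).length = dims.2.toNat := by
    unfold plot_map
    simp [PySem.List.length_pyRange_one]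
  have hBlen : (plot_map_alt input dims).length = dims.2.toNat := by
    unfold plot_map_alt
    rw [pvFold_length]; exact hbaselen
  have hArow : ∀ y (hy : y < (plot_map input dims).length),
      (plot_map input dims)[y].length = dims.1.toNat := by
    intro y hy
    unfold plot_map
    rw [List.getElem_mapIdx]
    simp
  have hBrow : ∀ row ∈ plot_map_alt input dims, row.length = dims.1.toNat := by
    unfold plot_map_alt
    exact pvFold_rows _ _ _ _ _ hbaserows
  apply List.ext_getElem (by rw [hAlen, hBlen])
  intro y hy1 hy2
  have hyh : y < dims.2.toNat := by omega
  apply List.ext_getElem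
    (by rw [hArow y hy1, hBrow _ (List.getElem_mem _)])
  intro x hx1 hx2
  have hxw : x < dims.1.toNat := by rw [hArow y hy1] at hx1; exact hx1
  have hA := pvA_cell input dims x y hxw hyh
  have hB : ((plot_map_alt input dims).getD y []).getD x "" =
      if ((x : Int), (y : Int)) ∈ input then "#" else "." := by
    unfold plot_map_alt
    rw [pvFold_cell dims.1 dims.2 input _ x y hbaselen hbaserows hxw hyh]
    rw [pvB_base_cell dims.1 dims.2 x y hxw hyh]
  rw [List.getD_eq_getElem _ _ hy1, List.getD_eq_getElem _ _ hx1] at hA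
  rw [List.getD_eq_getElem _ _ hy2, List.getD_eq_getElem _ _ hx2] at hB
  rw [hA, hB]
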